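-- pv_equiv track=rewrite | github.com/ji4866/Algorithm | 프로그래머스/0/120837. 개미 군단/개미 군단.py | solution
-- ===== SOURCE A (Python) =====
-- def solution(hp):
--     count, answer = 0, 0
--     list_ = [5,3,1]
--
--     for i in list_:
--         count = hp//i
--         hp -= i*count
--         answer += count
--
--     return answer
-- ===== SOURCE B (Python) =====
-- def solution(hp):
--     # Number of ants for the remainder hp % 5 is precomputed in a residue table
--     # (r -> r//3 + r%3 for r in 0..4): no greedy division chain, one division + one lookup.
--     EXTRA = (0, 1, 2, 1, 2)
--     return hp // 5 + EXTRA[hp % 5]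
-- ===== Notes on version B (the rewrite author's own statement) =====
-- stated objective: alternative
-- what changed: Replaces the greedy division loop over [5,3,1] by a single division by 5 plus a precomputed residue-table lookup for the remainder (the table enumerates the optimal ant count for each residue 0..4).
import Mathlib
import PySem

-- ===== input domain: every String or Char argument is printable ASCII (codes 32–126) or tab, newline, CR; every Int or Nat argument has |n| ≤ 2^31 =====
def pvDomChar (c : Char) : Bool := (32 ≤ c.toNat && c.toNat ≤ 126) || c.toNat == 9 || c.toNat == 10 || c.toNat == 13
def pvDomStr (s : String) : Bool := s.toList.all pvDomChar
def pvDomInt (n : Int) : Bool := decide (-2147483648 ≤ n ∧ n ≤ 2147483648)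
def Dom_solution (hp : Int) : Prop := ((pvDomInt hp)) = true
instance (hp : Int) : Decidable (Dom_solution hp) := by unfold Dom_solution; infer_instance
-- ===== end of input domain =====

-- ===== PORT A =====
-- B replaces A's greedy division loop over [5,3,1] by one division by 5 plus a
-- precomputed residue-table lookup (alternative decomposition; same values).
def solution (hp : Int) : Int :=
  let st := [(5:Int),3,1].foldl (fun (s : Int × Int × Int) i =>
    let count := PySem.Int.floordiv s.1 i
    let hp' := s.1 - i * count
    (hp', count, s.2.2 + count)) (hp, 0, 0)
  st.2.2

-- ===== PORT B =====
-- EXTRA[hp % 5]: the index hp % 5 is always in 0..4 (Python % with positive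
-- divisor), so the tuple indexing never raises; ported with pyGetD (default
-- unreachable).
def solution_alt (hp : Int) : Int :=
  PySem.Int.floordiv hp 5 +
    PySem.List.pyGetD [(0:Int), 1, 2, 1, 2] (PySem.Int.mod hp 5) 0

-- ===== PRECONDITION & SPEC =====
def Spec_solution (hp : Int) (out : Int) : Prop := out = solution_alt hp
instance (hp : Int) (out : Int) : Decidable (Spec_solution hp out) := by unfold Spec_solution; infer_instance

-- ===== CLAIM =====
def Claim_equal_solution : Prop := ∀ (hp : Int), Dom_solution hp → Spec_solution hp (solution hp)

-- ===== LEMMAS AND PROOFS =====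

-- ===== VERDICT =====
theorem solution_spec : Claim_equal_solution := by
  intro hp _
  unfold Spec_solution solution solution_alt
  simp only [List.foldl]
  have h5 := PySem.Int.floordiv_mul_add_mod hp 5
  have h1a : ∀ x : Int, PySem.Int.floordiv x 1 = x := fun x => by
    simp [PySem.Int.floordiv, Int.fdiv_one]
  rw [show hp - 5 * PySem.Int.floordiv hp 5 = PySem.Int.mod hp 5 by linarith, h1a]
  have hlo : 0 ≤ PySem.Int.mod hp 5 := PySem.Int.mod_nonneg hp (by norm_num)
  have hhi : PySem.Int.mod hp 5 < 5 := PySem.Int.mod_lt hp (by norm_num)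
  set r := PySem.Int.mod hp 5 with hr
  interval_cases r <;> norm_num [PySem.List.pyGetD, PySem.List.pyIdx?, PySem.Int.floordiv,
    show Int.fdiv 1 3 = 0 from by decide, show Int.fdiv 2 3 = 0 from by decide,
    show Int.fdiv 3 3 = 1 from by decide, show Int.fdiv 4 3 = 1 from by decide,
    show Int.toNat 2 = 2 from rfl, show Int.toNat 3 = 3 from rfl,
    show Int.toNat 4 = 4 from rfl] <;> omega
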